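-- pv_equiv track=rewrite | github.com/v4d1/Wordlister | wordlister.py | addNumStart
-- ===== SOURCE A (Python) =====
-- def addNumStart(dicc): #GENERA NUMS 0-999 0-9 00-99 000-999
-- 	dicc2 = []
-- 	for palabras in dicc:
-- 		diccaux = []
--
-- 		for i in range (0,10):
-- 			diccaux.append(str(i) + palabras)
-- 			for j in range (0,10):
-- 				diccaux.append(str(i) + str(j) + palabras)
-- 				for k in range (0,10):
-- 					diccaux.append(str(i) + str(j) + str(k) + palabras)
-- 		dicc2 = dicc2 + diccaux
-- 	return dicc2
-- ===== SOURCE B (Python) =====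
-- def _gen(depth, prefix):
--     # DFS over the digit-prefix tree: emit prefix+d, then all deeper prefixes under it.
--     if depth == 0:
--         return []
--     out = []
--     for d in range(10):
--         p = prefix + str(d)
--         out = out + [p] + _gen(depth - 1, p)
--     return out
--
-- def addNumStart(dicc):
--     prefixes = _gen(3, "")
--     return [p + w for w in dicc for p in prefixes]
-- ===== Notes on version B (the rewrite author's own statement) =====
-- stated objective: faster
-- what changed: B precomputes the 1110 digit prefixes once with a recursive DFS over the prefix tree (matching A's interleaved emission order) and then applies them to every word in a single flat comprehension; A instead regenerates the prefixes inside triply nested loops for each word and rebuilds the output list with 'dicc2 = dicc2 + diccaux' on every word, which recopies the whole accumulated output and is quadratic in the number of words.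
import Mathlib
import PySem

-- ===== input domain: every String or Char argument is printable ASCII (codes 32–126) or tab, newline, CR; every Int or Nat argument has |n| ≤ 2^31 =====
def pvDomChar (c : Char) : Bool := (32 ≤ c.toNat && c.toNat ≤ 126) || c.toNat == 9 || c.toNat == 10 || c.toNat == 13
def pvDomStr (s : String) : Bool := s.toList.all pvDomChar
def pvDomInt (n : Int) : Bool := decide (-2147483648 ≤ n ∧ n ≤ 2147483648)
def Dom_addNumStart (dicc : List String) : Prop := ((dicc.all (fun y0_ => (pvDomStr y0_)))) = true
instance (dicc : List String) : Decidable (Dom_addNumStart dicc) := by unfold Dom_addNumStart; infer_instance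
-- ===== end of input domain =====

-- B builds the 1110 digit prefixes once with a recursive DFS and applies them in one
-- flat pass per word, instead of regenerating them inside triply nested loops per word.

-- ===== PORT A =====
def addNumStart (dicc : List String) : List String :=
  dicc.foldl (fun dicc2 palabras =>
    let diccaux :=
      (PySem.List.pyRange 0 10 1).foldl (fun acc i =>
        let acc := acc ++ [PySem.Int.toStr i ++ palabras]
        (PySem.List.pyRange 0 10 1).foldl (fun acc j =>
          let acc := acc ++ [PySem.Int.toStr i ++ PySem.Int.toStr j ++ palabras]
          (PySem.List.pyRange 0 10 1).foldl (fun acc k =>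
            acc ++ [PySem.Int.toStr i ++ PySem.Int.toStr j ++ PySem.Int.toStr k ++ palabras]) acc) acc) []
    dicc2 ++ diccaux) []

-- ===== PORT B =====
def pvGen : Nat → String → List String
  | 0, _ => []
  | depth + 1, pre =>
    (PySem.List.pyRange 0 10 1).foldl (fun out d =>
      let p := pre ++ PySem.Int.toStr d
      out ++ [p] ++ pvGen depth p) []

def addNumStart_alt (dicc : List String) : List String :=
  let prefixes := pvGen 3 ""
  dicc.flatMap (fun w => prefixes.map (fun p => p ++ w))

-- ===== PRECONDITION & SPEC =====
def Spec_addNumStart (dicc : List String) (out : List String) : Prop := out = addNumStart_alt dicc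
instance (dicc : List String) (out : List String) : Decidable (Spec_addNumStart dicc out) := by unfold Spec_addNumStart; infer_instance

-- ===== CLAIM (what is proved, stated in full; the proofs are below) =====
def Claim_equal_addNumStart : Prop := ∀ (dicc : List String), Dom_addNumStart dicc → Spec_addNumStart dicc (addNumStart dicc)

-- ===== LEMMAS AND PROOFS =====
theorem pvRange10 : PySem.List.pyRange 0 10 1 = [0,1,2,3,4,5,6,7,8,9] := by decide

set_option maxRecDepth 10000 in
theorem pvInner_eq (w : String) :
    (PySem.List.pyRange 0 10 1).foldl (fun acc i =>
        let acc := acc ++ [PySem.Int.toStr i ++ w]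
        (PySem.List.pyRange 0 10 1).foldl (fun acc j =>
          let acc := acc ++ [PySem.Int.toStr i ++ PySem.Int.toStr j ++ w]
          (PySem.List.pyRange 0 10 1).foldl (fun acc k =>
            acc ++ [PySem.Int.toStr i ++ PySem.Int.toStr j ++ PySem.Int.toStr k ++ w]) acc) acc) []
      = (pvGen 3 "").map (fun p => p ++ w) := by
  simp [pvRange10, pvGen, List.foldl, String.append_assoc]

set_option maxRecDepth 10000 in
set_option maxHeartbeats 1000000 in
theorem pvOuter (l : List String) (acc : List String) :
    l.foldl (fun dicc2 palabras =>
      let diccaux :=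
        (PySem.List.pyRange 0 10 1).foldl (fun acc i =>
          let acc := acc ++ [PySem.Int.toStr i ++ palabras]
          (PySem.List.pyRange 0 10 1).foldl (fun acc j =>
            let acc := acc ++ [PySem.Int.toStr i ++ PySem.Int.toStr j ++ palabras]
            (PySem.List.pyRange 0 10 1).foldl (fun acc k =>
              acc ++ [PySem.Int.toStr i ++ PySem.Int.toStr j ++ PySem.Int.toStr k ++ palabras]) acc) acc) []
      dicc2 ++ diccaux) acc
    = acc ++ l.flatMap (fun w => (pvGen 3 "").map (fun p => p ++ w)) := by
  induction l generalizing acc with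
  | nil => simp
  | cons x xs ih =>
    rw [List.foldl_cons, ih, List.flatMap_cons]
    rw [pvInner_eq x]
    rw [List.append_assoc]

set_option maxRecDepth 10000 in
set_option maxHeartbeats 1000000 in
theorem addNumStart_spec : Claim_equal_addNumStart := by
  intro dicc _
  show addNumStart dicc = addNumStart_alt dicc
  unfold addNumStart addNumStart_alt
  exact (pvOuter dicc []).trans (List.nil_append _)
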